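-- pv_equiv track=rewrite | github.com/Leviathantheesper/PosetResolutionCalc | methods.py | images
-- ===== SOURCE A (Python) =====
-- def images(dic,free_mod_gens):
--     """
--     Computes the arrows of a list of monomials in the minfree resolution of a path.
--     Parameters
--     ----------
--     dic : dict
--         dictionary of the free resolution.
--     free_mod_gens : list
--         list of monomials.
--     Returns
--     -------
--     imag : list
--         list of monomials.
--     """
--     imag={}
--     for mon in free_mod_gens:
--         cod=[]
--         deg=[]
--         if len(mon)>5:
--             for edge in dic:
--                 if mon==edge[1]:
--                     cod.append(edge[0])
--                     deg.append(dic[edge])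
--             imag[mon]=[cod,deg]
--     return imag
-- ===== SOURCE B (Python) =====
-- def images(dic, free_mod_gens):
--     # One grouping pass over the edges instead of rescanning dic for every monomial.
--     imag = {mon: [[], []] for mon in free_mod_gens if len(mon) > 5}
--     if imag:
--         for edge in dic:
--             tgt = edge[1]
--             if tgt in imag:
--                 imag[tgt][0].append(edge[0])
--                 imag[tgt][1].append(dic[edge])
--     return imag
-- ===== Notes on version B (the rewrite author's own statement) =====
-- stated objective: faster
-- what changed: A rescans the whole edge dictionary once per qualifying monomial (nested loops); B builds the key table in one pass over free_mod_gens and then groups with a single pass over the edges, skipping the pass entirely when no monomial qualifies.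
import Mathlib
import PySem

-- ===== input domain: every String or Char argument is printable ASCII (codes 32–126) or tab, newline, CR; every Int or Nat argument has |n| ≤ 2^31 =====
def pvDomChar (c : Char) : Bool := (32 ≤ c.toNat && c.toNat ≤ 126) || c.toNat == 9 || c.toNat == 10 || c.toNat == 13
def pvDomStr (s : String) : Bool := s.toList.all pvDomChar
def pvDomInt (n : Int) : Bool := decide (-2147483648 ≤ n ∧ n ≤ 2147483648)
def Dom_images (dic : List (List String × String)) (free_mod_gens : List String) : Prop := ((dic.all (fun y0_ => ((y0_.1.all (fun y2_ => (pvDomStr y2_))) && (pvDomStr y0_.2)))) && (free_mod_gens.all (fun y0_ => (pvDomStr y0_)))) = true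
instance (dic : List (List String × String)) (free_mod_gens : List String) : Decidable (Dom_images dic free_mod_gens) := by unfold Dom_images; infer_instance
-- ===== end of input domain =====

-- B replaces A's per-monomial rescan of all edges by a key-initialisation pass plus ONE
-- grouping pass over the edges (objective: faster, O(M+E·L) instead of O(M·E)).

-- ===== PORT A =====
-- edge[1] / edge[0] are ported with pyGetD (total form of xs[i]); Pre_images excludes the
-- inputs where Python's indexing would raise IndexError, so pyGetD is exact there.
def images (dic : List (List String × String)) (free_mod_gens : List String) : List (String × List (List String)) :=
  (free_mod_gens.foldl
    (fun (imag : PySem.Dict String (List (List String))) mon =>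
      if PySem.Str.len mon > 5 then
        let cd := dic.foldl
          (fun (p : List String × List String) edge =>
            if mon == PySem.List.pyGetD edge.1 1 "" then
              (p.1 ++ [PySem.List.pyGetD edge.1 0 ""],
               p.2 ++ [(PySem.Dict.mk dic).getD edge.1 ""])
            else p)
          ([], [])
        imag.insert mon [cd.1, cd.2]
      else imag)
    PySem.Dict.empty).items

-- ===== PORT B =====
def images_alt (dic : List (List String × String)) (free_mod_gens : List String) : List (String × List (List String)) :=
  let init : PySem.Dict String (List (List String)) :=
    free_mod_gens.foldl
      (fun imag mon => if PySem.Str.len mon > 5 then imag.insert mon [[], []] else imag)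
      PySem.Dict.empty
  if init.items.isEmpty then init.items
  else
    (dic.foldl
      (fun (imag : PySem.Dict String (List (List String))) edge =>
        if imag.contains (PySem.List.pyGetD edge.1 1 "") then
          imag.modify (PySem.List.pyGetD edge.1 1 "") []
            (fun v => [v.getD 0 [] ++ [PySem.List.pyGetD edge.1 0 ""],
                       v.getD 1 [] ++ [(PySem.Dict.mk dic).getD edge.1 ""]])
        else imag)
      init).items

-- ===== PRECONDITION & SPEC =====
-- Pre_ excludes exactly the inputs where A raises IndexError: when some monomial has
-- length > 5 the edge loop runs and indexes edge[1], so every key must have ≥ 2 entries.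
def Pre_images (dic : List (List String × String)) (free_mod_gens : List String) : Prop :=
  (∃ mon ∈ free_mod_gens, PySem.Str.len mon > 5) → ∀ e ∈ dic, 2 ≤ e.1.length
instance (dic : List (List String × String)) (free_mod_gens : List String) : Decidable (Pre_images dic free_mod_gens) := by unfold Pre_images; infer_instance

def pvWitness_images : (List (List String × String)) × List String :=
  ([(["a", "abcdefg"], "x")], ["abcdefg"])

def Spec_images (dic : List (List String × String)) (free_mod_gens : List String) (out : List (String × List (List String))) : Prop := out = images_alt dic free_mod_gens
instance (dic : List (List String × String)) (free_mod_gens : List String) (out : List (String × List (List String))) : Decidable (Spec_images dic free_mod_gens out) := by unfold Spec_images; infer_instance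

-- ===== CLAIM (what is proved, stated in full; the proofs are below) =====
def Claim_equal_images : Prop := ∀ (dic : List (List String × String)) (free_mod_gens : List String), Dom_images dic free_mod_gens → Pre_images dic free_mod_gens → Spec_images dic free_mod_gens (images dic free_mod_gens)

-- ===== LEMMAS AND PROOFS =====

-- the target / source component of an edge key, and the dict lookup dic[edge]
def pvTgt (e : List String × String) : String := PySem.List.pyGetD e.1 1 ""
def pvSrc (e : List String × String) : String := PySem.List.pyGetD e.1 0 ""
def pvVal (dic : List (List String × String)) (e : List String × String) : String :=
  (PySem.Dict.mk dic).getD e.1 ""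

-- the edges of l whose target is k, as the (source, value) column pair
def pvF (dic l : List (List String × String)) (k : String) : List String × List String :=
  ((l.filter (fun e => pvTgt e == k)).map pvSrc,
   (l.filter (fun e => pvTgt e == k)).map (pvVal dic))

def pvG (dic : List (List String × String)) (k : String) : List (List String) :=
  [(pvF dic dic k).1, (pvF dic dic k).2]

-- A's inner scan step over the edges (literally the fold step in the port of A)
def pvScanStep (dic : List (List String × String)) (mon : String)
    (p : List String × List String) (edge : List String × String) : List String × List String :=
  if mon == PySem.List.pyGetD edge.1 1 "" then
    (p.1 ++ [PySem.List.pyGetD edge.1 0 ""], p.2 ++ [(PySem.Dict.mk dic).getD edge.1 ""])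
  else p

lemma pvScan_pair (dic : List (List String × String)) (mon : String) :
    ∀ (l : List (List String × String)) (a b : List String),
      l.foldl (pvScanStep dic mon) (a, b)
        = (a ++ (pvF dic l mon).1, b ++ (pvF dic l mon).2) := by
  intro l
  induction l with
  | nil => intro a b; simp [pvF]
  | cons e rest ih =>
    intro a b
    by_cases h : mon = pvTgt e
    · have hb : (pvTgt e == mon) = true := by simp [h]
      simp only [List.foldl_cons, pvScanStep]
      rw [if_pos (by simp [h, pvTgt])]
      rw [ih]
      simp only [pvF, List.filter_cons, hb, List.append_assoc, List.cons_append]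
      rfl
    · have hb : (pvTgt e == mon) = false := by
        simp only [beq_eq_false_iff_ne, ne_eq]
        exact fun hh => h hh.symm
      simp only [List.foldl_cons, pvScanStep]
      rw [if_neg (by simpa [pvTgt] using h)]
      rw [ih]
      simp only [pvF, List.filter_cons, hb]
      rfl

-- B's edge step (literally the fold step in the port of B)
def pvBStep (dic : List (List String × String))
    (imag : PySem.Dict String (List (List String))) (edge : List String × String) :
    PySem.Dict String (List (List String)) :=
  if imag.contains (PySem.List.pyGetD edge.1 1 "") then
    imag.modify (PySem.List.pyGetD edge.1 1 "") []
      (fun v => [v.getD 0 [] ++ [PySem.List.pyGetD edge.1 0 ""],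
                 v.getD 1 [] ++ [(PySem.Dict.mk dic).getD edge.1 ""]])
  else imag

-- B's grouping pass, characterised: it appends to each present key the columns of the
-- remaining edges targeting that key.
lemma pvBmain (dic : List (List String × String)) :
    ∀ (l : List (List String × String)) (d : PySem.Dict String (List (List String))),
      d.keys.Nodup → (∀ p ∈ d.items, ∃ c g, p.2 = [c, g]) →
      (l.foldl (pvBStep dic) d).items
        = d.items.map (fun p =>
            (p.1, [p.2.getD 0 [] ++ (pvF dic l p.1).1, p.2.getD 1 [] ++ (pvF dic l p.1).2])) := by
  intro l
  induction l with
  | nil =>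
    intro d _ hs
    simp only [List.foldl_nil, pvF, List.filter_nil, List.map_nil, List.append_nil]
    have hid : ∀ p ∈ d.items,
        (fun (p : String × List (List String)) => (p.1, [p.2.getD 0 [], p.2.getD 1 []])) p = id p := by
      intro p hp
      obtain ⟨c, g, h2⟩ := hs p hp
      obtain ⟨p1, p2⟩ := p
      simp only at h2
      subst h2
      simp
    exact ((List.map_congr_left hid).trans (List.map_id _)).symm
  | cons e rest ih =>
    intro d hnd hs
    simp only [List.foldl_cons]
    by_cases hc : d.contains (PySem.List.pyGetD e.1 1 "") = true
    · have hstep : pvBStep dic d e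
          = d.insert (PySem.List.pyGetD e.1 1 "")
              [(d.getD (PySem.List.pyGetD e.1 1 "") []).getD 0 [] ++ [PySem.List.pyGetD e.1 0 ""],
               (d.getD (PySem.List.pyGetD e.1 1 "") []).getD 1 [] ++ [(PySem.Dict.mk dic).getD e.1 ""]] := by
        unfold pvBStep PySem.Dict.modify
        rw [if_pos hc]
      rw [hstep]
      rw [ih _ (PySem.Dict.nodup_keys_insert _ _ _ hnd) (by
        intro p hp
        rcases (PySem.Dict.mem_items_insert _ _ _ _).mp hp with h1 | h2
        · exact ⟨_, _, by rw [h1]⟩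
        · exact hs p h2.1)]
      rw [PySem.Dict.items_insert_of_contains _ _ hc, List.map_map]
      apply List.map_congr_left
      intro p hp
      by_cases hk : p.1 = PySem.List.pyGetD e.1 1 ""
      · have hv : d.getD (PySem.List.pyGetD e.1 1 "") [] = p.2 := by
          rw [← hk]
          exact PySem.Dict.getD_of_mem_items d (by simpa using hp) hnd []
        have hb : (pvTgt e == p.1) = true := by simp [pvTgt, hk]
        simp only [Function.comp_def, hk, beq_self_eq_true, if_pos, hv]
        simp [pvF, List.append_assoc, pvSrc, pvVal, pvTgt]
      · have hb : (pvTgt e == p.1) = false := by simp [pvTgt]; exact fun hh => hk hh.symm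
        simp only [Function.comp_def]
        rw [if_neg (by simpa using hk)]
        simp [pvF, hb]
    · have hstep : pvBStep dic d e = d := by
        unfold pvBStep
        rw [if_neg hc]
      rw [hstep, ih _ hnd hs]
      apply List.map_congr_left
      intro p hp
      have hkmem : p.1 ∈ d.keys := PySem.Dict.mem_keys_of_mem_items d hp
      have hk : (pvTgt e == p.1) = false := by
        simp only [PySem.Dict.contains_eq_decide_mem_keys] at hc
        simp only [pvTgt, beq_eq_false_iff_ne, ne_eq]
        intro hh
        exact hc (by simp [hh ▸ hkmem])
      simp [pvF, hk]

-- A's monomial loop, characterised through the value-rewriting map pvMapG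
def pvMapG (dic : List (List String × String)) (d : PySem.Dict String (List (List String))) :
    PySem.Dict String (List (List String)) :=
  PySem.Dict.mk (d.items.map (fun p => (p.1, pvG dic p.1)))

lemma pvKeys_mapG (dic : List (List String × String)) (d : PySem.Dict String (List (List String))) :
    (pvMapG dic d).keys = d.keys := by
  simp [pvMapG, PySem.Dict.keys, List.map_map, Function.comp]

lemma pvContains_mapG (dic : List (List String × String)) (d : PySem.Dict String (List (List String)))
    (k : String) : (pvMapG dic d).contains k = d.contains k := by
  simp [PySem.Dict.contains_eq_decide_mem_keys, pvKeys_mapG]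

lemma pvInsert_mapG (dic : List (List String × String)) (d : PySem.Dict String (List (List String)))
    (mon : String) (w : List (List String)) :
    (pvMapG dic d).insert mon (pvG dic mon) = pvMapG dic (d.insert mon w) := by
  apply PySem.Dict.ext
  rw [PySem.Dict.items_insert]
  rw [pvContains_mapG]
  by_cases hc : d.contains mon = true
  · rw [if_pos hc]
    simp only [pvMapG, PySem.Dict.items_insert, hc, if_pos]
    simp only [List.map_map]
    apply List.map_congr_left
    intro p _
    by_cases hk : p.1 = mon
    · simp [hk]
    · simp [hk]
  · rw [if_neg hc]
    simp only [pvMapG, PySem.Dict.items_insert, hc, if_neg, Bool.false_eq_true,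
      not_false_iff, List.map_append, List.map_cons, List.map_nil]

-- A's outer fold step (literally the outer fold of the port of A)
def pvAStep (dic : List (List String × String))
    (imag : PySem.Dict String (List (List String))) (mon : String) :
    PySem.Dict String (List (List String)) :=
  if PySem.Str.len mon > 5 then
    imag.insert mon [(dic.foldl (pvScanStep dic mon) ([], [])).1,
                     (dic.foldl (pvScanStep dic mon) ([], [])).2]
  else imag

-- B's initialisation step (literally the first fold of the port of B)
def pvInitStep (imag : PySem.Dict String (List (List String))) (mon : String) :
    PySem.Dict String (List (List String)) :=
  if PySem.Str.len mon > 5 then imag.insert mon [[], []] else imag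

lemma pvAStep_insert (dic : List (List String × String)) (mon : String)
    (h : PySem.Str.len mon > 5) (d : PySem.Dict String (List (List String))) :
    pvAStep dic d mon = d.insert mon (pvG dic mon) := by
  unfold pvAStep
  rw [if_pos h, pvScan_pair]
  simp [pvG]

lemma pvAmain (dic : List (List String × String)) :
    ∀ (fmg : List String) (d : PySem.Dict String (List (List String))),
      fmg.foldl (pvAStep dic) (pvMapG dic d) = pvMapG dic (fmg.foldl pvInitStep d) := by
  intro fmg
  induction fmg with
  | nil => intro d; rfl
  | cons mon rest ih =>
    intro d
    simp only [List.foldl_cons]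
    by_cases h : PySem.Str.len mon > 5
    · rw [pvAStep_insert dic mon h, pvInsert_mapG dic d mon [[], []],
        show pvInitStep d mon = d.insert mon [[], []] from by unfold pvInitStep; rw [if_pos h]]
      exact ih _
    · rw [show pvAStep dic (pvMapG dic d) mon = pvMapG dic d from by unfold pvAStep; rw [if_neg h],
        show pvInitStep d mon = d from by unfold pvInitStep; rw [if_neg h]]
      exact ih _

-- invariants of the initialisation fold
lemma pvInit_nodup : ∀ (fmg : List String) (d : PySem.Dict String (List (List String))),
    d.keys.Nodup → (fmg.foldl pvInitStep d).keys.Nodup := by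
  intro fmg
  induction fmg with
  | nil => intro d h; exact h
  | cons mon rest ih =>
    intro d h
    simp only [List.foldl_cons, pvInitStep]
    by_cases hq : PySem.Str.len mon > 5
    · rw [if_pos hq]; exact ih _ (PySem.Dict.nodup_keys_insert _ _ _ h)
    · rw [if_neg hq]; exact ih _ h

lemma pvInit_shape : ∀ (fmg : List String) (d : PySem.Dict String (List (List String))),
    (∀ p ∈ d.items, p.2 = [[], []]) →
    (∀ p ∈ (fmg.foldl pvInitStep d).items, p.2 = ([[], []] : List (List String))) := by
  intro fmg
  induction fmg with
  | nil => intro d h; exact h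
  | cons mon rest ih =>
    intro d h
    simp only [List.foldl_cons, pvInitStep]
    by_cases hq : PySem.Str.len mon > 5
    · rw [if_pos hq]
      refine ih _ ?_
      intro p hp
      rcases (PySem.Dict.mem_items_insert _ _ _ _).mp hp with h1 | h2
      · rw [h1]
      · exact h p h2.1
    · rw [if_neg hq]; exact ih _ h

-- ===== VERDICT (by name: the statement is the Claim_ definition above) =====
theorem images_spec : Claim_equal_images := by
  intro dic fmg _ _
  unfold Spec_images
  have hA : images dic fmg = (fmg.foldl (pvAStep dic) PySem.Dict.empty).items := rfl
  have hempty : (PySem.Dict.empty : PySem.Dict String (List (List String)))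
      = pvMapG dic PySem.Dict.empty := by
    apply PySem.Dict.ext; simp [pvMapG, PySem.Dict.empty]
  set initd := fmg.foldl pvInitStep (PySem.Dict.empty : PySem.Dict String (List (List String)))
    with hinitd
  have hA2 : images dic fmg = initd.items.map (fun p => (p.1, pvG dic p.1)) := by
    rw [hA, hempty, pvAmain dic fmg PySem.Dict.empty, ← hinitd]
    rfl
  have hBfold : images_alt dic fmg
      = if initd.items.isEmpty then initd.items else (dic.foldl (pvBStep dic) initd).items := rfl
  have hnd : initd.keys.Nodup := by
    apply pvInit_nodup
    simp [PySem.Dict.empty, PySem.Dict.keys]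
  have hshape : ∀ p ∈ initd.items, p.2 = ([[], []] : List (List String)) := by
    apply pvInit_shape
    simp [PySem.Dict.empty]
  rw [hA2, hBfold]
  by_cases he : initd.items.isEmpty
  · rw [if_pos he]
    rw [List.isEmpty_iff.mp he]
    rfl
  · rw [if_neg he, pvBmain dic dic initd hnd (fun p hp => ⟨_, _, hshape p hp⟩)]
    apply List.map_congr_left
    intro p hp
    rw [hshape p hp]
    simp [pvG]
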